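-- pv_equiv track=rewrite | github.com/Morneplaine/EVE | overview_alert.py | check_band_for_alert_colors
-- ===== SOURCE A (Python) =====
-- def _in_range(r: int, g: int, b: int, r_min: int, r_max: int, g_min: int, g_max: int, b_min: int, b_max: int) -> bool:
--     return r_min <= r <= r_max and g_min <= g <= g_max and b_min <= b <= b_max
--
-- def _is_purple(r: int, g: int, b: int, color_ranges: dict | None = None) -> bool:
--     """Exclude purple (e.g. EVE overview selection ~ #5B1C5B)."""
--     if color_ranges and "purple" in color_ranges:
--         t = color_ranges["purple"]
--         return _in_range(r, g, b, t[0], t[1], t[2], t[3], t[4], t[5])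
--     if g > 55:
--         return False
--     return 50 <= r <= 130 and 50 <= b <= 130
--
-- def is_teal(r: int, g: int, b: int, color_ranges: dict | None = None) -> bool:
--     """Teal/cyan: low R, high G and B (or use ranges)."""
--     if _is_purple(r, g, b, color_ranges):
--         return False
--     if color_ranges and "teal" in color_ranges:
--         t = color_ranges["teal"]
--         return _in_range(r, g, b, t[0], t[1], t[2], t[3], t[4], t[5])
--     return r < 120 and g > 140 and b > 140 and abs(g - b) < 80
--
-- def is_yellow(r: int, g: int, b: int, color_ranges: dict | None = None) -> bool:
--     """Yellow/orange band: high R and G, low B (or use ranges)."""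
--     if _is_purple(r, g, b, color_ranges):
--         return False
--     if color_ranges and "yellow" in color_ranges:
--         t = color_ranges["yellow"]
--         return _in_range(r, g, b, t[0], t[1], t[2], t[3], t[4], t[5])
--     return r > 160 and g > 140 and b < 165
--
-- def is_red(r: int, g: int, b: int, color_ranges: dict | None = None) -> bool:
--     """Red: high R, low G and B (or use ranges)."""
--     if _is_purple(r, g, b, color_ranges):
--         return False
--     if color_ranges and "red" in color_ranges:
--         t = color_ranges["red"]
--         return _in_range(r, g, b, t[0], t[1], t[2], t[3], t[4], t[5])
--     return r > 180 and g < 100 and b < 100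
--
-- def pixel_matches_alert_color(r: int, g: int, b: int, color_ranges: dict | None = None) -> str | None:
--     """Return 'teal'|'yellow'|'red' if pixel matches an alert color, else None. color_ranges: optional dict of name -> (r_min,r_max,g_min,g_max,b_min,b_max)."""
--     if is_teal(r, g, b, color_ranges):
--         return "teal"
--     if is_yellow(r, g, b, color_ranges):
--         return "yellow"
--     if is_red(r, g, b, color_ranges):
--         return "red"
--     return None
--
-- def check_band_for_alert_colors(pixels, require_count: int = 8, color_ranges: dict | None = None):
--     """
--     Check sampled pixels for teal, yellow, or red (excluding purple).
--     If at least require_count pixels match the same alert color, return that color name.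
--     color_ranges: optional dict of name -> (r_min,r_max,g_min,g_max,b_min,b_max).
--     """
--     counts = {"teal": 0, "yellow": 0, "red": 0}
--     for r, g, b in pixels:
--         color = pixel_matches_alert_color(r, g, b, color_ranges)
--         if color:
--             counts[color] += 1
--     for color, count in counts.items():
--         if count >= require_count:
--             return color
--     return None
-- ===== SOURCE B (Python) =====
-- def _hit(r, g, b, color_ranges, name, default):
--     t = color_ranges.get(name) if color_ranges else None
--     if t is not None:
--         return t[0] <= r <= t[1] and t[2] <= g <= t[3] and t[4] <= b <= t[5]
--     return default
--
--
-- def _classify(r, g, b, color_ranges):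
--     """Priority classification: purple veto first, then teal > yellow > red."""
--     if _hit(r, g, b, color_ranges, "purple",
--             g <= 55 and 50 <= r <= 130 and 50 <= b <= 130):
--         return None
--     if _hit(r, g, b, color_ranges, "teal",
--             r < 120 and g > 140 and b > 140 and abs(g - b) < 80):
--         return "teal"
--     if _hit(r, g, b, color_ranges, "yellow",
--             r > 160 and g > 140 and b < 165):
--         return "yellow"
--     if _hit(r, g, b, color_ranges, "red",
--             r > 180 and g < 100 and b < 100):
--         return "red"
--     return None
--
--
-- def check_band_for_alert_colors(pixels, require_count: int = 8, color_ranges: dict | None = None):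
--     pixels = list(pixels)
--     for name in ("teal", "yellow", "red"):
--         if sum(1 for (r, g, b) in pixels
--                if _classify(r, g, b, color_ranges) == name) >= require_count:
--             return name
--     return None
-- ===== Notes on version B (the rewrite author's own statement) =====
-- stated objective: alternative
-- what changed: Replaces A's single pass that builds a per-color counts dict (then scans its items) by three per-color scans over the ordered names teal/yellow/red, each counting pixels the shared priority classifier assigns to that name and returning the first name reaching the threshold; the classifier itself checks the purple veto once instead of inside each color predicate.
-- outside the precondition, e.g. on check_band_for_alert_colors([], 0, {'teal': []}): A returns 'teal', B returns 'teal'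
import Mathlib
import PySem

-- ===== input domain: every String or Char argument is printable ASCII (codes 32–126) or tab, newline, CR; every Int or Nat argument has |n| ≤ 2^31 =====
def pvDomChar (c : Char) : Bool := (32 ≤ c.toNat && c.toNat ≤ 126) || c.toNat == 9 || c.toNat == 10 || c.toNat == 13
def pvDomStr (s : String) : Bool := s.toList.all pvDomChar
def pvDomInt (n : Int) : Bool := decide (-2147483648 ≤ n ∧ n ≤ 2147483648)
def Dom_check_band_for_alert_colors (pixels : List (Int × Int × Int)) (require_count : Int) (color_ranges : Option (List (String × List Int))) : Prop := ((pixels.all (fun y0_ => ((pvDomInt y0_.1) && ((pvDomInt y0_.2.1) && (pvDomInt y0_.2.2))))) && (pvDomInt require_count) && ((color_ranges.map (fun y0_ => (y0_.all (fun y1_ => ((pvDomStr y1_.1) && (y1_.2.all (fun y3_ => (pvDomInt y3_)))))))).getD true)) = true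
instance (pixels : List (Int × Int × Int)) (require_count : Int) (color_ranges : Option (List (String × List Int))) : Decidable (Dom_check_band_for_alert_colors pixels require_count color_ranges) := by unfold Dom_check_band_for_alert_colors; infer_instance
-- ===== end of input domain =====

-- B replaces A's one-pass counts-dict-then-scan by three per-color counting scans (same cost, no dict);
-- alternative decomposition, not claimed faster.

-- ===== PORT A =====
-- `color_ranges and name in color_ranges` then `color_ranges[name]`: some value iff dict truthy and key present
def pvLookupA (cr : Option (List (String × List Int))) (name : String) : Option (List Int) :=
  match cr with
  | none => none
  | some [] => none
  | some l => (PySem.Dict.mk l).get? name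

-- t[0]..t[5]; Python raises IndexError if t has fewer than 6 entries — those inputs are outside Pre_
def pvInRangeA (t : List Int) (r g b : Int) : Bool :=
  match t with
  | t0 :: t1 :: t2 :: t3 :: t4 :: t5 :: _ =>
      decide (t0 ≤ r) && decide (r ≤ t1) && decide (t2 ≤ g) && decide (g ≤ t3) &&
      decide (t4 ≤ b) && decide (b ≤ t5)
  | _ => false

def pvIsPurple (r g b : Int) (cr : Option (List (String × List Int))) : Bool :=
  match pvLookupA cr "purple" with
  | some t => pvInRangeA t r g b
  | none => if g > 55 then false else decide (50 ≤ r) && decide (r ≤ 130) && decide (50 ≤ b) && decide (b ≤ 130)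

def pvIsTeal (r g b : Int) (cr : Option (List (String × List Int))) : Bool :=
  if pvIsPurple r g b cr then false
  else match pvLookupA cr "teal" with
  | some t => pvInRangeA t r g b
  | none => decide (r < 120) && decide (g > 140) && decide (b > 140) && decide (|g - b| < 80)

def pvIsYellow (r g b : Int) (cr : Option (List (String × List Int))) : Bool :=
  if pvIsPurple r g b cr then false
  else match pvLookupA cr "yellow" with
  | some t => pvInRangeA t r g b
  | none => decide (r > 160) && decide (g > 140) && decide (b < 165)

def pvIsRed (r g b : Int) (cr : Option (List (String × List Int))) : Bool :=
  if pvIsPurple r g b cr then false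
  else match pvLookupA cr "red" with
  | some t => pvInRangeA t r g b
  | none => decide (r > 180) && decide (g < 100) && decide (b < 100)

def pixel_matches_alert_color (r g b : Int) (cr : Option (List (String × List Int))) : Option String :=
  if pvIsTeal r g b cr then some "teal"
  else if pvIsYellow r g b cr then some "yellow"
  else if pvIsRed r g b cr then some "red"
  else none

def check_band_for_alert_colors (pixels : List (Int × Int × Int)) (require_count : Int) (color_ranges : Option (List (String × List Int))) : Option String :=
  let counts := pixels.foldl (fun (d : PySem.Dict String Int) p =>
      match pixel_matches_alert_color p.1 p.2.1 p.2.2 color_ranges with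
      | some c => d.modify c 0 (· + 1)   -- counts[color] += 1 (key always present)
      | none => d)
    (PySem.Dict.mk [("teal", 0), ("yellow", 0), ("red", 0)])
  (counts.items.find? (fun kv => decide (require_count ≤ kv.2))).map (·.1)

-- ===== PORT B =====
-- `t = color_ranges.get(name) if color_ranges else None`
def pvGetBand (cr : Option (List (String × List Int))) (name : String) : Option (List Int) :=
  match cr with
  | none => none
  | some [] => none
  | some l => (PySem.Dict.mk l).get? name

-- t[0] <= r <= t[1] and …; Python raises IndexError on a short t — outside Pre_
def pvInRangeB (t : List Int) (r g b : Int) : Bool :=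
  match t with
  | t0 :: t1 :: t2 :: t3 :: t4 :: t5 :: _ =>
      decide (t0 ≤ r) && decide (r ≤ t1) && decide (t2 ≤ g) && decide (g ≤ t3) &&
      decide (t4 ≤ b) && decide (b ≤ t5)
  | _ => false
def pvHit (r g b : Int) (cr : Option (List (String × List Int))) (name : String) (dflt : Bool) : Bool :=
  match pvGetBand cr name with
  | some t => pvInRangeB t r g b
  | none => dflt

def pvClassify (r g b : Int) (cr : Option (List (String × List Int))) : Option String :=
  if pvHit r g b cr "purple" (decide (g ≤ 55) && decide (50 ≤ r) && decide (r ≤ 130) && decide (50 ≤ b) && decide (b ≤ 130)) then none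
  else if pvHit r g b cr "teal" (decide (r < 120) && decide (g > 140) && decide (b > 140) && decide (|g - b| < 80)) then some "teal"
  else if pvHit r g b cr "yellow" (decide (r > 160) && decide (g > 140) && decide (b < 165)) then some "yellow"
  else if pvHit r g b cr "red" (decide (r > 180) && decide (g < 100) && decide (b < 100)) then some "red"
  else none

def check_band_for_alert_colors_alt (pixels : List (Int × Int × Int)) (require_count : Int) (color_ranges : Option (List (String × List Int))) : Option String :=
  ["teal", "yellow", "red"].find? (fun name =>
    decide (require_count ≤ ((pixels.countP (fun p => pvClassify p.1 p.2.1 p.2.2 color_ranges == some name) : Nat) : Int)))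

-- ===== PRECONDITION & SPEC =====
-- Pre_ excludes color_ranges carrying a purple/teal/yellow/red entry with fewer than 6 values: on such inputs
-- A raises IndexError whenever that entry is consulted for some pixel (it returns only in degenerate cases where
-- the short entry is never reached, where B agrees anyway).
def Pre_check_band_for_alert_colors (pixels : List (Int × Int × Int)) (require_count : Int) (color_ranges : Option (List (String × List Int))) : Prop :=
  ∀ p ∈ color_ranges.getD [], p.1 ∈ (["purple", "teal", "yellow", "red"] : List String) → 6 ≤ p.2.length
instance (pixels : List (Int × Int × Int)) (require_count : Int) (color_ranges : Option (List (String × List Int))) : Decidable (Pre_check_band_for_alert_colors pixels require_count color_ranges) := by unfold Pre_check_band_for_alert_colors; infer_instance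

def pvWitness_check_band_for_alert_colors : (List (Int × Int × Int)) × Int × (Option (List (String × List Int))) :=
  ([(0, 200, 200), (200, 50, 50)], 1, some [("red", [180, 255, 0, 99, 0, 99])])

def Spec_check_band_for_alert_colors (pixels : List (Int × Int × Int)) (require_count : Int) (color_ranges : Option (List (String × List Int))) (out : Option String) : Prop := out = check_band_for_alert_colors_alt pixels require_count color_ranges
instance (pixels : List (Int × Int × Int)) (require_count : Int) (color_ranges : Option (List (String × List Int))) (out : Option String) : Decidable (Spec_check_band_for_alert_colors pixels require_count color_ranges out) := by unfold Spec_check_band_for_alert_colors; infer_instance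

-- ===== CLAIM (what is proved, stated in full; the proofs are below) =====
def Claim_equal_check_band_for_alert_colors : Prop := ∀ (pixels : List (Int × Int × Int)) (require_count : Int) (color_ranges : Option (List (String × List Int))), Dom_check_band_for_alert_colors pixels require_count color_ranges → Pre_check_band_for_alert_colors pixels require_count color_ranges → Spec_check_band_for_alert_colors pixels require_count color_ranges (check_band_for_alert_colors pixels require_count color_ranges)

-- ===== LEMMAS AND PROOFS =====

-- the two per-pixel classifiers agree on every input
theorem classify_eq (r g b : Int) (cr : Option (List (String × List Int))) :
    pixel_matches_alert_color r g b cr = pvClassify r g b cr := by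
  have hg : pvGetBand cr = pvLookupA cr := rfl
  have hB : pvInRangeB = pvInRangeA := rfl
  unfold pixel_matches_alert_color pvClassify pvIsTeal pvIsYellow pvIsRed pvIsPurple pvHit
  rw [hg, hB]
  have hpd : ∀ X : Bool, (if g > 55 then false else X) = (decide (g ≤ 55) && X) := by
    intro X
    by_cases h : g > 55
    · simp [h, show ¬ g ≤ 55 by omega]
    · simp [h, show g ≤ 55 by omega]
  rw [hpd]
  generalize pvLookupA cr "purple" = P
  generalize pvLookupA cr "teal" = T
  generalize pvLookupA cr "yellow" = Y
  generalize pvLookupA cr "red" = R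
  cases P <;> simp [Bool.and_assoc] <;> split_ifs <;> simp_all <;> omega

theorem classify_mem (r g b : Int) (cr : Option (List (String × List Int))) (c : String)
    (h : pixel_matches_alert_color r g b cr = some c) :
    c = "teal" ∨ c = "yellow" ∨ c = "red" := by
  unfold pixel_matches_alert_color at h
  split_ifs at h <;> simp_all

theorem modify_teal (x y z : Int) : (PySem.Dict.mk [("teal",x),("yellow",y),("red",z)]).modify "teal" 0 (· + 1) = PySem.Dict.mk [("teal",x+1),("yellow",y),("red",z)] := by
  simp [PySem.Dict.modify, PySem.Dict.get?, PySem.Dict.insert, PySem.Dict.getD]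

theorem modify_yellow (x y z : Int) : (PySem.Dict.mk [("teal",x),("yellow",y),("red",z)]).modify "yellow" 0 (· + 1) = PySem.Dict.mk [("teal",x),("yellow",y+1),("red",z)] := by
  simp [PySem.Dict.modify, PySem.Dict.get?, PySem.Dict.insert, PySem.Dict.getD]

theorem modify_red (x y z : Int) : (PySem.Dict.mk [("teal",x),("yellow",y),("red",z)]).modify "red" 0 (· + 1) = PySem.Dict.mk [("teal",x),("yellow",y),("red",z+1)] := by
  simp [PySem.Dict.modify, PySem.Dict.get?, PySem.Dict.insert, PySem.Dict.getD]

-- the counting loop's invariant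
theorem fold_items (cr : Option (List (String × List Int))) (pixels : List (Int × Int × Int)) (a b c : Int) :
    (pixels.foldl (fun (d : PySem.Dict String Int) p =>
      match pixel_matches_alert_color p.1 p.2.1 p.2.2 cr with
      | some c => d.modify c 0 (· + 1)
      | none => d)
      (PySem.Dict.mk [("teal", a), ("yellow", b), ("red", c)])) =
    PySem.Dict.mk [("teal", a + (pixels.countP (fun p => pixel_matches_alert_color p.1 p.2.1 p.2.2 cr == some "teal") : Nat)),
                   ("yellow", b + (pixels.countP (fun p => pixel_matches_alert_color p.1 p.2.1 p.2.2 cr == some "yellow") : Nat)),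
                   ("red", c + (pixels.countP (fun p => pixel_matches_alert_color p.1 p.2.1 p.2.2 cr == some "red") : Nat))] := by
  induction pixels generalizing a b c with
  | nil => simp
  | cons p ps ih =>
    rcases hm : pixel_matches_alert_color p.1 p.2.1 p.2.2 cr with _ | col
    · simp only [List.foldl_cons, hm, List.countP_cons]
      simp [ih]
    · rcases classify_mem _ _ _ _ _ hm with h | h | h <;> subst h <;>
        simp only [List.foldl_cons, hm, modify_teal, modify_yellow, modify_red, ih] <;>
        simp [hm] <;> omega

-- ===== VERDICT (by name: the statement is the Claim_ definition above) =====
theorem check_band_for_alert_colors_spec : Claim_equal_check_band_for_alert_colors := by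
  intro pixels require_count color_ranges _ _
  unfold Spec_check_band_for_alert_colors check_band_for_alert_colors check_band_for_alert_colors_alt
  rw [fold_items]
  simp only [classify_eq, zero_add]
  simp [List.find?]
  generalize List.countP (fun p => pvClassify p.1 p.2.1 p.2.2 color_ranges == some "teal") pixels = nT
  generalize List.countP (fun p => pvClassify p.1 p.2.1 p.2.2 color_ranges == some "yellow") pixels = nY
  generalize List.countP (fun p => pvClassify p.1 p.2.1 p.2.2 color_ranges == some "red") pixels = nR
  cases hT : decide (require_count ≤ (nT : Int)) <;>
    cases hY : decide (require_count ≤ (nY : Int)) <;>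
      cases hR : decide (require_count ≤ (nR : Int)) <;> simp [hT, hY, hR]
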